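-- pv_equiv track=rewrite | github.com/Anom2309/neuronada | app.py | generate_dynamic_reading
-- ===== SOURCE A (Python) =====
-- def generate_dynamic_reading(total_jummal):
--     mod = total_jummal % 4 if total_jummal % 4 != 0 else 4
--     el = {1: ("🔥 API (Nar)", "Sistem saraf eksekusi cepat, Anda inisiator."), 2: ("🌍 TANAH (Turab)", "Fondasi logis dan membumi."), 3: ("💨 UDARA (Hawa)", "Konseptor ide tanpa henti."), 4: ("💧 AIR (Ma')", "Emosional peka, empati beradaptasi.")}
--     p_red = " + ".join(list(str(total_jummal)))
--     s_red = sum(int(d) for d in str(total_jummal))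
--     r_num = s_red
--     while r_num > 9: r_num = sum(int(d) for d in str(r_num))
--     r_dict = {1:"Pencipta jalan baru", 2:"Penyelaras harmoni", 3:"Penyampai pesan", 4:"Pembangun sistem", 5:"Agen transformasi", 6:"Pengayom sejati", 7:"Pencari esensi", 8:"Pemegang kendali", 9:"Kesadaran universal"}
--     m_note = "<div style='background:rgba(212,175,55,0.1); padding:10px; border-radius:5px;'><span style='color:#FFD700;'>⚡ <b>KODE MASTER:</b></span> Intuisi Spiritual Tinggi Terdeteksi.</div>" if any(m in str(total_jummal) for m in ["11","22","33"]) else ""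
--     return el[mod][0], el[mod][1], p_red, s_red, r_num, r_dict.get(r_num,""), m_note
-- ===== SOURCE B (Python) =====
-- def generate_dynamic_reading(total_jummal):
--     s = str(total_jummal)
--     el = {1: ("🔥 API (Nar)", "Sistem saraf eksekusi cepat, Anda inisiator."), 2: ("🌍 TANAH (Turab)", "Fondasi logis dan membumi."), 3: ("💨 UDARA (Hawa)", "Konseptor ide tanpa henti."), 4: ("💧 AIR (Ma')", "Emosional peka, empati beradaptasi.")}
--     mod = (total_jummal - 1) % 4 + 1
--     p_red = " + ".join(s)
--     s_red = sum(int(c) for c in s)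
--     r_num = 0 if s_red == 0 else (s_red - 1) % 9 + 1
--     r_dict = {1:"Pencipta jalan baru", 2:"Penyelaras harmoni", 3:"Penyampai pesan", 4:"Pembangun sistem", 5:"Agen transformasi", 6:"Pengayom sejati", 7:"Pencari esensi", 8:"Pemegang kendali", 9:"Kesadaran universal"}
--     m_note = "<div style='background:rgba(212,175,55,0.1); padding:10px; border-radius:5px;'><span style='color:#FFD700;'>⚡ <b>KODE MASTER:</b></span> Intuisi Spiritual Tinggi Terdeteksi.</div>" if any(a == b and a in "123" for a, b in zip(s, s[1:])) else ""
--     return el[mod][0], el[mod][1], p_red, s_red, r_num, r_dict.get(r_num, ""), m_note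
-- ===== Notes on version B (the rewrite author's own statement) =====
-- stated objective: simpler
-- what changed: The digital-root while loop is replaced by the closed-form (s_red-1)%9+1 (with 0 for 0), the conditional mod-4 expression by the closed form (n-1)%4+1, and the three-substring master-code search by a single zip scan for an adjacent equal digit in '123'.
import Mathlib
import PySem

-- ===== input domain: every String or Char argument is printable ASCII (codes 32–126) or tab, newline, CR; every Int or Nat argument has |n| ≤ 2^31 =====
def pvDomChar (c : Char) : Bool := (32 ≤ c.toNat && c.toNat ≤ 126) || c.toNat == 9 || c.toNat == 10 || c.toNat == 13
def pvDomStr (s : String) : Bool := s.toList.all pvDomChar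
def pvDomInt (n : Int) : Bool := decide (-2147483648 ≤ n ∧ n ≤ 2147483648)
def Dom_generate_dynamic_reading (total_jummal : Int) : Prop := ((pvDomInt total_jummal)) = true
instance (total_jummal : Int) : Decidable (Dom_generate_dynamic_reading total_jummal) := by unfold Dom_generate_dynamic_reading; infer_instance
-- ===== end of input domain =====

-- B replaces A's digital-root while-loop and conditional mod-4 expression by closed-form arithmetic
-- and the three-substring master-code search by one adjacent-digit zip scan; same return values
-- wherever A returns (Pre_ excludes negative inputs, where A raises ValueError).


-- shared DATA constants (dict/string literals both Pythons contain verbatim)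
def elDict : PySem.Dict Int (String × String) :=
  ((((PySem.Dict.empty).insert 1 ("🔥 API (Nar)", "Sistem saraf eksekusi cepat, Anda inisiator.")).insert 2
      ("🌍 TANAH (Turab)", "Fondasi logis dan membumi.")).insert 3
      ("💨 UDARA (Hawa)", "Konseptor ide tanpa henti.")).insert 4
      ("💧 AIR (Ma')", "Emosional peka, empati beradaptasi.")

def rDict : PySem.Dict Int String :=
  (((((((((PySem.Dict.empty).insert 1 "Pencipta jalan baru").insert 2 "Penyelaras harmoni").insert 3
      "Penyampai pesan").insert 4 "Pembangun sistem").insert 5 "Agen transformasi").insert 6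
      "Pengayom sejati").insert 7 "Pencari esensi").insert 8 "Pemegang kendali").insert 9
      "Kesadaran universal"

def masterNote : String := "<div style='background:rgba(212,175,55,0.1); padding:10px; border-radius:5px;'><span style='color:#FFD700;'>⚡ <b>KODE MASTER:</b></span> Intuisi Spiritual Tinggi Terdeteksi.</div>"

-- int(d) for a single character d (both Pythons do this per digit char; exact: none only off digits)
def pyDigitVal (d : Char) : Int := (PySem.Int.ofChars? [d]).getD 0
-- sum(int(d) for d in cs)
def csum (cs : List Char) : Int := (cs.map pyDigitVal).sum

-- ===== PORT A =====
-- A's `while r_num > 9: r_num = sum(int(d) for d in str(r_num))`, made total with fuel;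
-- fuel s.toNat+1 suffices since each iteration strictly decreases a value > 9 (rloopA_eq_droot below)
def rloopA : Nat → Int → Int
  | 0, r => r
  | f + 1, r => if r > 9 then rloopA f (csum (PySem.Int.toChars r)) else r

def generate_dynamic_reading (total_jummal : Int) : String × String × String × Int × Int × String × String :=
  let md := if PySem.Int.mod total_jummal 4 ≠ 0 then PySem.Int.mod total_jummal 4 else 4
  let p_red := PySem.Str.join " + " ((PySem.Int.toChars total_jummal).map (fun c => String.ofList [c]))
  let s_red := csum (PySem.Int.toChars total_jummal)
  let r_num := rloopA (s_red.toNat + 1) s_red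
  let m_note := if ["11", "22", "33"].any (fun m => PySem.Str.isIn m (PySem.Int.toStr total_jummal)) then masterNote else ""
  let e := elDict.getD md ("", "")   -- md ∈ {1,2,3,4} always, so el[md] never raises KeyError
  (e.1, e.2, p_red, s_red, r_num, rDict.getD r_num "", m_note)

-- ===== PORT B =====
def generate_dynamic_reading_alt (total_jummal : Int) : String × String × String × Int × Int × String × String :=
  let s := PySem.Int.toChars total_jummal
  let md := PySem.Int.mod (total_jummal - 1) 4 + 1
  let p_red := PySem.Str.join " + " (s.map (fun c => String.ofList [c]))
  let s_red := csum s
  let r_num := if s_red = 0 then 0 else PySem.Int.mod (s_red - 1) 9 + 1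
  let m_note := if (s.zip s.tail).any (fun p => p.1 == p.2 && (p.1 == '1' || p.1 == '2' || p.1 == '3')) then masterNote else ""
  let e := elDict.getD md ("", "")
  (e.1, e.2, p_red, s_red, r_num, rDict.getD r_num "", m_note)

-- ===== PRECONDITION & SPEC =====
-- Pre_ excludes exactly the negative inputs: there str(total_jummal) begins with '-' and
-- int('-') raises ValueError in A (B raises there too).
def Pre_generate_dynamic_reading (total_jummal : Int) : Prop := 0 ≤ total_jummal
instance (total_jummal : Int) : Decidable (Pre_generate_dynamic_reading total_jummal) := by unfold Pre_generate_dynamic_reading; infer_instance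
def pvWitness_generate_dynamic_reading : Int := 29

def Spec_generate_dynamic_reading (total_jummal : Int) (out : String × String × String × Int × Int × String × String) : Prop := out = generate_dynamic_reading_alt total_jummal
instance (total_jummal : Int) (out : String × String × String × Int × Int × String × String) : Decidable (Spec_generate_dynamic_reading total_jummal out) := by unfold Spec_generate_dynamic_reading; infer_instance

-- ===== CLAIM (what is proved, stated in full; the proofs are below) =====
def Claim_equal_generate_dynamic_reading : Prop := ∀ (total_jummal : Int), Dom_generate_dynamic_reading total_jummal → Pre_generate_dynamic_reading total_jummal → Spec_generate_dynamic_reading total_jummal (generate_dynamic_reading total_jummal)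

-- ===== LEMMAS AND PROOFS =====

theorem pyDigitVal_digitChar (k : Nat) (hk : k < 10) : pyDigitVal (Nat.digitChar k) = (k : Int) := by
  interval_cases k <;> decide

-- csum over Nat.toDigitsCore is the base-10 digit sum
theorem csum_toDigitsCore (f : Nat) : ∀ (n : Nat) (ds : List Char), n < 10 ^ f →
    csum (Nat.toDigitsCore 10 f n ds) = ((Nat.digits 10 n).sum : Int) + csum ds := by
  induction f with
  | zero =>
    intro n ds h
    have : n = 0 := by simpa using h
    subst this; simp [Nat.toDigitsCore]
  | succ f ih =>
    intro n ds h
    rw [Nat.toDigitsCore]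
    by_cases h0 : n / 10 = 0
    · simp only [h0, if_true]
      rcases Nat.eq_zero_or_pos n with hn | hn
      · subst hn; simp [csum, pyDigitVal_digitChar 0 (by norm_num)]
      · rw [Nat.digits_def' (by norm_num) hn, h0]
        simp [csum, pyDigitVal_digitChar (n % 10) (Nat.mod_lt _ (by norm_num))]
    · simp only [h0, if_false]
      have hn : 0 < n := Nat.pos_of_ne_zero (by omega)
      rw [ih (n / 10) _ (by rw [pow_succ] at h; omega), Nat.digits_def' (by norm_num) hn]
      simp [csum, pyDigitVal_digitChar (n % 10) (Nat.mod_lt _ (by norm_num))]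
      ring

theorem csum_toChars (t : Int) (ht : 0 ≤ t) :
    csum (PySem.Int.toChars t) = ((Nat.digits 10 t.toNat).sum : Int) := by
  rw [PySem.Int.toChars, if_neg (by omega), Nat.toDigits]
  rw [csum_toDigitsCore (t.toNat + 1) t.toNat [] (by
    calc t.toNat < 10 ^ t.toNat := Nat.lt_pow_self (by norm_num)
      _ ≤ 10 ^ (t.toNat + 1) := Nat.pow_le_pow_right (by norm_num) (by omega))]
  simp [csum]

theorem digitsum_le (n : Nat) : (Nat.digits 10 n).sum ≤ n := by
  induction n using Nat.strong_induction_on with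
  | _ n ih =>
    rcases Nat.eq_zero_or_pos n with h | h
    · simp [h]
    · rw [Nat.digits_def' (by norm_num : (1:Nat) < 10) h]
      have := ih (n / 10) (by omega)
      simp only [List.sum_cons]
      omega

theorem digitsum_pos (n : Nat) (hn : 0 < n) : 0 < (Nat.digits 10 n).sum := by
  induction n using Nat.strong_induction_on with
  | _ n ih =>
    rw [Nat.digits_def' (by norm_num : (1:Nat) < 10) hn]
    simp only [List.sum_cons]
    rcases Nat.eq_zero_or_pos (n % 10) with h | h
    · have h10 : 0 < n / 10 := by omega
      have := ih (n / 10) (by omega) h10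
      omega
    · omega

theorem digitsum_lt (n : Nat) (hn : 10 ≤ n) : (Nat.digits 10 n).sum < n := by
  rw [Nat.digits_def' (by norm_num : (1:Nat) < 10) (by omega)]
  have := digitsum_le (n / 10)
  simp only [List.sum_cons]
  omega

-- A's while loop computes the closed-form digital root
theorem rloopA_eq_droot (f : Nat) : ∀ (s : Int), 0 ≤ s → s < (f : Int) →
    rloopA f s = if s = 0 then 0 else PySem.Int.mod (s - 1) 9 + 1 := by
  induction f with
  | zero => intro s h1 h2; omega
  | succ f ih =>
    intro s h1 h2
    rw [rloopA]
    by_cases h9 : s > 9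
    · rw [if_pos h9]
      have hd := csum_toChars s (by omega)
      set d : Nat := (Nat.digits 10 s.toNat).sum with hdd
      have hpos : 0 < d := digitsum_pos _ (by omega)
      have hlt : d < s.toNat := digitsum_lt _ (by omega)
      have hmod : (d : Int) % 9 = s % 9 := by
        have h9' := Nat.modEq_nine_digits_sum s.toNat
        have : s.toNat % 9 = d % 9 := h9'
        omega
      rw [ih _ (by omega) (by omega)]
      rw [if_neg (by omega), if_neg (by omega)]
      rw [PySem.Int.mod_eq_emod_of_pos (by norm_num), PySem.Int.mod_eq_emod_of_pos (by norm_num)]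
      omega
    · rw [if_neg h9]
      rw [PySem.Int.mod_eq_emod_of_pos (by norm_num)]
      by_cases h0 : s = 0
      · simp [h0]
      · rw [if_neg h0]
        omega

-- a length-2 run [c,c] is an infix iff some adjacent pair equals (c,c)
theorem pair_infix_iff (c : Char) (l : List Char) :
    [c, c] <:+: l ↔ ∃ p ∈ l.zip l.tail, p.1 = c ∧ p.2 = c := by
  induction l with
  | nil => simp
  | cons x xs ih =>
    rw [List.infix_cons_iff]
    constructor
    · rintro (hpre | hinf)
      · obtain ⟨t, ht⟩ := hpre
        cases xs with
        | nil => simp at ht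
        | cons y ys =>
          simp at ht
          exact ⟨(x, y), by simp, by simp [← ht.1, ← ht.2.1]⟩
      · obtain ⟨p, hp, h⟩ := ih.mp hinf
        cases xs with
        | nil => simp at hp
        | cons y ys => exact ⟨p, by simp at hp ⊢; right; exact hp, h⟩
    · rintro ⟨⟨a, b⟩, hp, h1, h2⟩
      simp only at h1 h2
      cases xs with
      | nil => simp at hp
      | cons y ys =>
        simp only [List.tail_cons, List.zip_cons_cons, List.mem_cons, Prod.mk.injEq] at hp
        rcases hp with ⟨rfl, rfl⟩ | hp
        · exact Or.inl ⟨ys, by simp [h1, h2]⟩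
        · exact Or.inr (ih.mpr ⟨(a, b), by simpa using hp, h1, h2⟩)

-- A's three-substring test equals B's adjacent-pair scan
theorem master_eq (l : List Char) :
    (["11", "22", "33"].any (fun m => PySem.Chars.isIn m.toList l))
      = (l.zip l.tail).any (fun p => p.1 == p.2 && (p.1 == '1' || p.1 == '2' || p.1 == '3')) := by
  rw [Bool.eq_iff_iff]
  simp only [List.any_eq_true, PySem.Chars.isIn_iff_infix, List.mem_cons]
  constructor
  · rintro ⟨m, hm, hinf⟩
    rcases hm with rfl | rfl | rfl | h
    · obtain ⟨p, hp, h1, h2⟩ := (pair_infix_iff '1' l).mp (by simpa using hinf)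
      exact ⟨p, hp, by simp [h1, h2]⟩
    · obtain ⟨p, hp, h1, h2⟩ := (pair_infix_iff '2' l).mp (by simpa using hinf)
      exact ⟨p, hp, by simp [h1, h2]⟩
    · obtain ⟨p, hp, h1, h2⟩ := (pair_infix_iff '3' l).mp (by simpa using hinf)
      exact ⟨p, hp, by simp [h1, h2]⟩
    · simp at h
  · rintro ⟨⟨a, b⟩, hp, hb⟩
    simp only [Bool.and_eq_true, Bool.or_eq_true, beq_iff_eq] at hb
    obtain ⟨rfl, hc⟩ := hb
    rcases hc with (rfl | rfl) | rfl
    · exact ⟨"11", by simp, (pair_infix_iff '1' l).mpr ⟨('1', '1'), hp, rfl, rfl⟩⟩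
    · exact ⟨"22", by simp, (pair_infix_iff '2' l).mpr ⟨('2', '2'), hp, rfl, rfl⟩⟩
    · exact ⟨"33", by simp, (pair_infix_iff '3' l).mpr ⟨('3', '3'), hp, rfl, rfl⟩⟩

-- ===== VERDICT (by name: the statement is the Claim_ definition above) =====
theorem generate_dynamic_reading_spec : Claim_equal_generate_dynamic_reading := by
  intro t _hdom hpre
  have hpre' : (0:Int) ≤ t := hpre
  unfold Spec_generate_dynamic_reading generate_dynamic_reading generate_dynamic_reading_alt
  have hs := csum_toChars t hpre'
  have hsnn : 0 ≤ csum (PySem.Int.toChars t) := by rw [hs]; positivity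
  have hmod : (if PySem.Int.mod t 4 ≠ 0 then PySem.Int.mod t 4 else 4) = PySem.Int.mod (t - 1) 4 + 1 := by
    rw [PySem.Int.mod_eq_emod_of_pos (by norm_num), PySem.Int.mod_eq_emod_of_pos (by norm_num)]
    split_ifs <;> omega
  have hr : rloopA ((csum (PySem.Int.toChars t)).toNat + 1) (csum (PySem.Int.toChars t))
      = (if csum (PySem.Int.toChars t) = 0 then 0 else PySem.Int.mod (csum (PySem.Int.toChars t) - 1) 9 + 1) :=
    rloopA_eq_droot _ _ hsnn (by omega)
  have hm : (["11", "22", "33"].any (fun m => PySem.Str.isIn m (PySem.Int.toStr t)))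
      = ((PySem.Int.toChars t).zip (PySem.Int.toChars t).tail).any
          (fun p => p.1 == p.2 && (p.1 == '1' || p.1 == '2' || p.1 == '3')) := by
    rw [← master_eq]
    simp [PySem.Str.isIn, PySem.Int.toList_toStr]
  simp only [hmod, hr, hm]
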